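-- pv_equiv track=rewrite | github.com/sksk1070/introdoction-to-cs-hw | hw5_318513843.py.py | prefix_suffix_overlap_hash2
-- ===== SOURCE A (Python) =====
-- def prefix_suffix_overlap_hash2(lst, k):
--     dict = {}
--     res = []
--     for index in range(len(lst)):
--         if lst[index][:k] in dict.keys():
--             dict[lst[index][:k]].append(index)
--         else:
--             dict[lst[index][:k]] = [index]
--     for i in range(len(lst)):
--         if lst[i][-k:] in dict:
--             for list_number in dict[lst[i][-k:]]:
--                 if list_number != i:
--                     res.append((list_number, i))
--     return res
-- ===== SOURCE B (Python) =====
-- def prefix_suffix_overlap_hash2(lst, k):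
--     n = len(lst)
--     res = []
--     for i in range(n):
--         suf = lst[i][-k:]
--         for j in range(n):
--             if j != i and lst[j][:k] == suf:
--                 res.append((j, i))
--     return res
-- ===== Notes on version B (the rewrite author's own statement) =====
-- stated objective: simpler
-- what changed: Replaced the prefix-index dict built in a first pass and looked up in a second with a direct nested double loop comparing lst[j][:k] to lst[i][-k:] in place.
import Mathlib
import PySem

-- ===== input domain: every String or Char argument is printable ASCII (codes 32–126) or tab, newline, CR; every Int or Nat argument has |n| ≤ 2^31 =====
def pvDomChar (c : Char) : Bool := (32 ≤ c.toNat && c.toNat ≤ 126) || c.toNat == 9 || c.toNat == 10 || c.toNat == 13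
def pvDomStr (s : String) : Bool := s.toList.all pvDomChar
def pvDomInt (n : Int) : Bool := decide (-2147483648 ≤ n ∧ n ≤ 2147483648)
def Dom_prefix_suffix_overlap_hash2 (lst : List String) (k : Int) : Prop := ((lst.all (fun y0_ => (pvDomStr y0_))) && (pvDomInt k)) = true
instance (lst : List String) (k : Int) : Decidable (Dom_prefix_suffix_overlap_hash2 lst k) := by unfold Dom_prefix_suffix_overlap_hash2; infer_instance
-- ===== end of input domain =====

-- B drops A's dict-of-prefix-groups and uses a plain nested double loop (simpler, same return value).

-- s[:k] and s[-k:] (shared slice helpers, exact Python slice semantics via PySem)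
def pvPref (s : String) (k : Int) : String := PySem.Str.slice s none (some k)
def pvSuf (s : String) (k : Int) : String := PySem.Str.slice s (some (-k)) none

-- ===== PORT A =====
def prefix_suffix_overlap_hash2 (lst : List String) (k : Int) : List (Int × Int) :=
  let d : PySem.Dict String (List Int) :=
    (PySem.List.pyRange 0 lst.length 1).foldl (fun d index =>
      let key := pvPref (PySem.List.pyGetD lst index "") k
      if d.contains key then d.insert key (d.getD key [] ++ [index])
      else d.insert key [index]) PySem.Dict.empty
  (PySem.List.pyRange 0 lst.length 1).foldl (fun res i =>
    let key := pvSuf (PySem.List.pyGetD lst i "") k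
    if d.contains key then
      (d.getD key []).foldl (fun res list_number =>
        if list_number ≠ i then res ++ [(list_number, i)] else res) res
    else res) []

-- ===== PORT B =====
def prefix_suffix_overlap_hash2_alt (lst : List String) (k : Int) : List (Int × Int) :=
  (PySem.List.pyRange 0 lst.length 1).foldl (fun res i =>
    let suf := pvSuf (PySem.List.pyGetD lst i "") k
    (PySem.List.pyRange 0 lst.length 1).foldl (fun res j =>
      if j ≠ i ∧ pvPref (PySem.List.pyGetD lst j "") k = suf then res ++ [(j, i)] else res) res) []

-- ===== PRECONDITION & SPEC =====
def Spec_prefix_suffix_overlap_hash2 (lst : List String) (k : Int) (out : List (Int × Int)) : Prop := out = prefix_suffix_overlap_hash2_alt lst k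
instance (lst : List String) (k : Int) (out : List (Int × Int)) : Decidable (Spec_prefix_suffix_overlap_hash2 lst k out) := by unfold Spec_prefix_suffix_overlap_hash2; infer_instance

-- ===== CLAIM (what is proved, stated in full; the proofs are below) =====
def Claim_equal_prefix_suffix_overlap_hash2 : Prop := ∀ (lst : List String) (k : Int), Dom_prefix_suffix_overlap_hash2 lst k → Spec_prefix_suffix_overlap_hash2 lst k (prefix_suffix_overlap_hash2 lst k)

-- ===== LEMMAS AND PROOFS =====

-- A's first loop groups indices by key: looking up c yields exactly the j's with key j = c, in order.
theorem groupFold_getD (key : Int → String) (l : List Int) (d : PySem.Dict String (List Int)) (c : String) :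
    (l.foldl (fun d j =>
      if d.contains (key j) then d.insert (key j) (d.getD (key j) [] ++ [j])
      else d.insert (key j) [j]) d).getD c []
    = d.getD c [] ++ l.filter (fun j => key j = c) := by
  induction l generalizing d with
  | nil => simp
  | cons j t ih =>
    simp only [List.foldl_cons, List.filter_cons, ih]
    by_cases hc : d.contains (key j)
    · simp only [hc, if_true]
      by_cases he : key j = c
      · subst he
        rw [PySem.Dict.getD_insert_self]
        simp
      · rw [PySem.Dict.getD_insert_of_ne _ _ _ (fun h => he h.symm)]
        simp [he]
    · simp only [hc, if_false, Bool.false_eq_true]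
      by_cases he : key j = c
      · subst he
        rw [PySem.Dict.getD_insert_self,
            PySem.Dict.getD_of_not_contains _ _ (by simpa using hc)]
        simp
      · rw [PySem.Dict.getD_insert_of_ne _ _ _ (fun h => he h.symm)]
        simp [he]

-- an append-if foldl collects the filtered, mapped elements
theorem foldl_appendIf {α β : Type} (p : α → Prop) [DecidablePred p] (f : α → β)
    (l : List α) (res : List β) :
    l.foldl (fun res x => if p x then res ++ [f x] else res) res
    = res ++ (l.filter (fun x => decide (p x))).map f := by
  induction l generalizing res with
  | nil => simp
  | cons x t ih =>
    by_cases h : p x <;> simp [h, ih]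

theorem foldl_congr_fun {α β : Type} (f g : β → α → β) (l : List α) (init : β)
    (h : ∀ acc x, f acc x = g acc x) : l.foldl f init = l.foldl g init := by
  have : f = g := funext fun a => funext fun x => h a x
  rw [this]

theorem prefix_suffix_overlap_hash2_spec : Claim_equal_prefix_suffix_overlap_hash2 := by
  intro lst k _
  show prefix_suffix_overlap_hash2 lst k = prefix_suffix_overlap_hash2_alt lst k
  unfold prefix_suffix_overlap_hash2 prefix_suffix_overlap_hash2_alt
  simp only []
  apply foldl_congr_fun
  intro res i
  set key : Int → String := fun j => pvPref (PySem.List.pyGetD lst j "") k with hkey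
  set R := PySem.List.pyRange 0 (lst.length : Int) 1 with hR
  set c := pvSuf (PySem.List.pyGetD lst i "") k with hc
  set d : PySem.Dict String (List Int) :=
    R.foldl (fun d index =>
      if d.contains (key index) then d.insert (key index) (d.getD (key index) [] ++ [index])
      else d.insert (key index) [index]) PySem.Dict.empty with hd
  have hgrp : d.getD c [] = R.filter (fun j => key j = c) := by
    rw [hd, groupFold_getD key R PySem.Dict.empty c, PySem.Dict.getD_empty]
    simp
  have hB : R.foldl (fun res j => if j ≠ i ∧ key j = c then res ++ [(j, i)] else res) res
      = res ++ ((R.filter (fun j => decide (j ≠ i ∧ key j = c))).map (fun j => (j, i))) :=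
    foldl_appendIf (fun j => j ≠ i ∧ key j = c) (fun j => (j, i)) R res
  by_cases hcon : d.contains c
  · simp only [hcon, if_true]
    rw [foldl_appendIf (fun j => j ≠ i) (fun j => (j, i)) (d.getD c []) res, hgrp, hB]
    congr 1
    rw [List.filter_filter]
    apply congrArg (List.map _)
    apply List.filter_congr
    intro j _
    by_cases h1 : j = i <;> by_cases h2 : key j = c <;> simp [h1, h2]
  · simp only [hcon, if_false, Bool.false_eq_true]
    have hempty : d.getD c [] = [] := PySem.Dict.getD_of_not_contains _ _ (by simpa using hcon)
    have h0 : R.filter (fun j => key j = c) = [] := by rw [← hgrp, hempty]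
    rw [hB]
    have hnil : R.filter (fun j => decide (j ≠ i ∧ key j = c)) = [] := by
      rw [List.filter_eq_nil_iff] at h0 ⊢
      intro x hx hpx
      exact h0 x hx (by simp at hpx ⊢; exact hpx.2)
    rw [hnil]
    simp
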